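-- pv_equiv track=rewrite | github.com/Cloud-Innovation-Partners/cloudtdms | system/cloudtdms/providers/location/__init__.py | replace_hashes
-- ===== SOURCE A (Python) =====
-- def replace_hashes(format, cell_number, country_code):
--     code = ''
--     if format.startswith('+'):
--         code = country_code
--         code = code.replace(' ', '')
--         # format=format[2:]
--         cell_number = list(code + cell_number)[1:]
--     else:
--         cell_number = list(code + cell_number)
--     for i in range(len(cell_number)):
--         format = format.replace('#', str(cell_number[i]), 1)
--     formatted_cell_number = format
--     return formatted_cell_number
-- ===== SOURCE B (Python) =====
-- def replace_hashes(format, cell_number, country_code):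
--     if format.startswith('+'):
--         digits = list(country_code.replace(' ', '') + cell_number)[1:]
--     else:
--         digits = list(cell_number)
--     parts = format.split('#')
--     it = iter(digits)
--     return parts[0] + ''.join(next(it, '#') + p for p in parts[1:])
-- ===== Notes on version B (the rewrite author's own statement) =====
-- stated objective: faster
-- what changed: Replaced the per-digit format.replace('#', d, 1) rescans with a split of format on '#' followed by one join that interleaves the segments with the digits (surplus '#' kept via next(it,'#')).
-- outside the precondition, e.g. on replace_hashes('##', '#a', ''): A returns 'a#', B returns '#a'
import Mathlib
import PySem

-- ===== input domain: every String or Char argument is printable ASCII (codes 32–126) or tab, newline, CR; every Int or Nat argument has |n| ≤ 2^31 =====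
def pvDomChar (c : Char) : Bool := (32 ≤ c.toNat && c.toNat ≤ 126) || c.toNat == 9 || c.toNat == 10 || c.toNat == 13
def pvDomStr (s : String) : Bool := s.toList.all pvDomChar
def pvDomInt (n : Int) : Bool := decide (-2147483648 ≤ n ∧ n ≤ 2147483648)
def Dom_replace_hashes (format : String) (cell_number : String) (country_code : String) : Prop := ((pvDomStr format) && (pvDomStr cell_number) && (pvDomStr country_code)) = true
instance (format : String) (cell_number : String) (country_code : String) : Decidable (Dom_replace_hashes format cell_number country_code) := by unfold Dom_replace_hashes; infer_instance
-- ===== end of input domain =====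

-- ===== PORT A =====
-- B replaces A's repeated format.replace('#', d, 1) rescans with split-on-'#' + one interleaving join (objective: faster).
-- hand-port of format.replace('#', d, 1) for a single replacement char d: exact, since old ('#') and
-- new (str(cell_number[i])) are both single characters, so only the first '#' is rewritten.
def replaceHashOnce : List Char → Char → List Char
  | [], _ => []
  | c :: rest, d => if c = '#' then d :: rest else c :: replaceHashOnce rest d

def replace_hashes (format : String) (cell_number : String) (country_code : String) : String :=
  -- '+' branch: code = country_code.replace(' ',''); cell_number = list(code + cell_number)[1:]  ([1:] on a list = drop 1, exact)
  let cellL : List Char :=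
    if PySem.Str.startswith format "+" then
      ((PySem.Str.replace country_code " " "").toList ++ cell_number.toList).drop 1
    else
      cell_number.toList
  -- for i in range(len(cell_number)): format = format.replace('#', str(cell_number[i]), 1)
  String.ofList (cellL.foldl (fun f d => replaceHashOnce f d) format.toList)

-- ===== PORT B =====
-- hand-port of format.split('#') for the single-char separator '#': exact (returns the first
-- segment and the list of the remaining segments, i.e. parts[0] and parts[1:]).
def splitHash : List Char → List Char × List (List Char)
  | [] => ([], [])
  | c :: rest =>
    let (p, ps) := splitHash rest
    if c = '#' then ([], p :: ps) else (c :: p, ps)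

-- the join ''.join(next(it,'#') + p for p in parts[1:]): each remaining segment is prefixed by
-- the next digit, or by '#' once the digit iterator is exhausted
def joinRest : List (List Char) → List Char → List Char
  | [], _ => []
  | p :: ps, ds =>
    match ds with
    | d :: ds' => (d :: p) ++ joinRest ps ds'
    | [] => ('#' :: p) ++ joinRest ps []

def replace_hashes_alt (format : String) (cell_number : String) (country_code : String) : String :=
  let digits : List Char :=
    if PySem.Str.startswith format "+" then
      ((PySem.Str.replace country_code " " "").toList ++ cell_number.toList).drop 1
    else
      cell_number.toList
  let parts := splitHash format.toList
  String.ofList (parts.1 ++ joinRest parts.2 digits)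

-- ===== PRECONDITION & SPEC =====
-- Pre_ excludes inputs whose substituted character list has a '#' among the positions a placeholder can
-- consume (the first count('#', format) of them): there A's replace-one-at-a-time writes '#' into the slot
-- and then re-substitutes the same slot on the next iteration, an accidental corner no caller of a phone
-- formatter specifies; B's natural split-and-join fills each placeholder once.
def Pre_replace_hashes (format : String) (cell_number : String) (country_code : String) : Prop :=
  '#' ∉ (if PySem.Str.startswith format "+" then
           ((PySem.Str.replace country_code " " "").toList ++ cell_number.toList).drop 1
         else
           cell_number.toList).take (format.toList.count '#')
instance (format : String) (cell_number : String) (country_code : String) : Decidable (Pre_replace_hashes format cell_number country_code) := by unfold Pre_replace_hashes; infer_instance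

def pvWitness_replace_hashes : String × String × String := ("+# (###) ##", "1234567", "+91 ")

def Spec_replace_hashes (format : String) (cell_number : String) (country_code : String) (out : String) : Prop := out = replace_hashes_alt format cell_number country_code
instance (format : String) (cell_number : String) (country_code : String) (out : String) : Decidable (Spec_replace_hashes format cell_number country_code out) := by unfold Spec_replace_hashes; infer_instance

-- ===== CLAIM (what is proved, stated in full; the proofs are below) =====
def Claim_equal_replace_hashes : Prop := ∀ (format : String) (cell_number : String) (country_code : String), Dom_replace_hashes format cell_number country_code → Pre_replace_hashes format cell_number country_code → Spec_replace_hashes format cell_number country_code (replace_hashes format cell_number country_code)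

-- ===== LEMMAS AND PROOFS =====
theorem foldl_replaceHashOnce_nil (ds : List Char) :
    ds.foldl (fun f d => replaceHashOnce f d) [] = [] := by
  induction ds with
  | nil => rfl
  | cons d ds ih => simpa [replaceHashOnce] using ih

theorem foldl_replaceHashOnce_cons {c : Char} (hc : c ≠ '#') (ds rest : List Char) :
    ds.foldl (fun f d => replaceHashOnce f d) (c :: rest)
      = c :: ds.foldl (fun f d => replaceHashOnce f d) rest := by
  induction ds generalizing rest with
  | nil => rfl
  | cons d ds ih => simpa [replaceHashOnce, hc] using ih (replaceHashOnce rest d)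

theorem splitHash_join_nil (f : List Char) :
    (splitHash f).1 ++ joinRest (splitHash f).2 [] = f := by
  induction f with
  | nil => rfl
  | cons c rest ih =>
    by_cases hc : c = '#' <;> simp [splitHash, hc, joinRest] <;>
      simpa [joinRest] using ih

theorem foldl_eq_splitJoin (f : List Char) :
    ∀ ds : List Char, '#' ∉ ds.take (f.count '#') →
      ds.foldl (fun g d => replaceHashOnce g d) f
        = (splitHash f).1 ++ joinRest (splitHash f).2 ds := by
  induction f with
  | nil => intro ds _; simp [splitHash, joinRest, foldl_replaceHashOnce_nil]
  | cons c rest ih =>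
    intro ds hds
    by_cases hc : c = '#'
    · subst hc
      cases ds with
      | nil => simpa [joinRest] using (splitHash_join_nil ('#' :: rest)).symm
      | cons d ds' =>
        rw [List.count_cons_self, List.take_succ_cons] at hds
        have hd : d ≠ '#' := fun h => hds (by simp [h])
        have hds' : '#' ∉ ds'.take (rest.count '#') := fun h => hds (by simp [h])
        simp only [List.foldl_cons, replaceHashOnce, splitHash, joinRest, if_true]
        rw [foldl_replaceHashOnce_cons hd, ih ds' hds']
        simp
    · rw [show List.count '#' (c :: rest) = List.count '#' rest by simp [hc]] at hds
      rw [foldl_replaceHashOnce_cons hc, ih ds hds]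
      simp [splitHash, hc]

-- ===== VERDICT (by name: the statement is the Claim_ definition above) =====
theorem replace_hashes_spec : Claim_equal_replace_hashes := by
  intro format cell_number country_code _ hpre
  unfold Spec_replace_hashes replace_hashes replace_hashes_alt
  unfold Pre_replace_hashes at hpre
  by_cases h : PySem.Str.startswith format "+" = true <;>
    simp only [h, if_true] at hpre ⊢ <;>
    rw [foldl_eq_splitJoin _ _ hpre]
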